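-- pv_equiv track=rewrite | github.com/Monduli/Creatures-of-Habbitt-Pygame | helpers.py | find_i
-- ===== SOURCE A (Python) =====
-- def find_i(spread, pos):
--     x = pos[0]
--     y = pos[1]
--     for j in range(len(spread)-1):
--         for k in range(len(spread)-1):
--             check_x, check_y = spread[j], spread[k]
--             check_x_high, check_y_high = spread[j+1], spread[k+1]
--             if check_x <= x < check_x_high:
--                 if check_y <= y < check_y_high:
--                     ret = j + (k*10)
--                     return ret
--     raise Exception(str(pos) + " is not a valid location on the board.")
-- ===== SOURCE B (Python) =====
-- def find_i(spread, pos):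
--     x = pos[0]
--     y = pos[1]
--
--     def first_cell(v):
--         for i in range(len(spread) - 1):
--             if spread[i] <= v < spread[i + 1]:
--                 return i
--         return None
--
--     j = first_cell(x)
--     k = first_cell(y)
--     if j is None or k is None:
--         raise Exception(str(pos) + " is not a valid location on the board.")
--     return j + k * 10
-- ===== Notes on version B (the rewrite author's own statement) =====
-- stated objective: faster
-- what changed: The inner k-scan of A does not depend on j, so B replaces the nested j,k loops with two independent single passes that find the first x-interval and the first y-interval separately.
import Mathlib
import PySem

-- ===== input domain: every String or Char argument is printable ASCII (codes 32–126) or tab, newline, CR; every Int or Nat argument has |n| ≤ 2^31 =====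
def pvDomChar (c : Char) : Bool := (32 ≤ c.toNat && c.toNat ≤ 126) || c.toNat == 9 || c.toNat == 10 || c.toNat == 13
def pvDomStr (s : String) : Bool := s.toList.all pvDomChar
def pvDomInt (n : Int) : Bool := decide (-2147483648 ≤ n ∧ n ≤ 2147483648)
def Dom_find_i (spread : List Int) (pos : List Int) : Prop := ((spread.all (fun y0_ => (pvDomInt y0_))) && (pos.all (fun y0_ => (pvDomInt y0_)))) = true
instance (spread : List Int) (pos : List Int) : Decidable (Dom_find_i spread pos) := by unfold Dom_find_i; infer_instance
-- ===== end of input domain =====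

-- B replaces A's nested j,k scan by two independent single passes (the inner scan does not depend on j).
-- Pre_ excludes exactly the inputs where A raises (pos shorter than 2, or no grid interval contains x or y); B raises there too.

-- ===== PORT A =====
-- inner 'for k' loop of A, for a fixed j
def pvAGoK (spread : List Int) (x y : Int) (j : Nat) : List Nat → Option Int
  | [] => none
  | k :: ks =>
    let check_x := spread.getD j 0
    let check_y := spread.getD k 0
    let check_x_high := spread.getD (j+1) 0
    let check_y_high := spread.getD (k+1) 0
    if check_x ≤ x ∧ x < check_x_high then
      if check_y ≤ y ∧ y < check_y_high then some ((j : Int) + (k : Int) * 10)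
      else pvAGoK spread x y j ks
    else pvAGoK spread x y j ks

-- outer 'for j' loop of A
def pvAGoJ (spread : List Int) (x y : Int) : List Nat → Option Int
  | [] => none
  | j :: js =>
    match pvAGoK spread x y j (List.range (spread.length - 1)) with
    | some r => some r
    | none => pvAGoJ spread x y js

def find_i (spread : List Int) (pos : List Int) : Int :=
  match PySem.List.pyGet? pos 0, PySem.List.pyGet? pos 1 with
  | some x, some y => (pvAGoJ spread x y (List.range (spread.length - 1))).getD 0  -- none = the raise, excluded by Pre_
  | _, _ => 0  -- IndexError, excluded by Pre_

-- ===== PORT B =====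
-- first_cell of B: first index i with spread[i] <= v < spread[i+1]
def pvBFirstCell (spread : List Int) (v : Int) : List Nat → Option Nat
  | [] => none
  | i :: is =>
    if spread.getD i 0 ≤ v ∧ v < spread.getD (i+1) 0 then some i
    else pvBFirstCell spread v is

def find_i_alt (spread : List Int) (pos : List Int) : Int :=
  match PySem.List.pyGet? pos 0 with
  | none => 0  -- IndexError, excluded by Pre_
  | some x =>
    match PySem.List.pyGet? pos 1 with
    | none => 0  -- IndexError, excluded by Pre_
    | some y =>
      match pvBFirstCell spread x (List.range (spread.length - 1)) with
      | none => 0  -- the raise (j is None), excluded by Pre_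
      | some j =>
        match pvBFirstCell spread y (List.range (spread.length - 1)) with
        | none => 0  -- the raise (k is None), excluded by Pre_
        | some k => (j : Int) + (k : Int) * 10

-- ===== PRECONDITION & SPEC =====
-- Pre_ = exactly the inputs where A returns: pos has two coordinates and some interval of spread contains each.
def Pre_find_i (spread : List Int) (pos : List Int) : Prop :=
  2 ≤ pos.length ∧
  (∃ j ∈ List.range (spread.length - 1), spread.getD j 0 ≤ pos.getD 0 0 ∧ pos.getD 0 0 < spread.getD (j+1) 0) ∧
  (∃ k ∈ List.range (spread.length - 1), spread.getD k 0 ≤ pos.getD 1 0 ∧ pos.getD 1 0 < spread.getD (k+1) 0)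
instance (spread : List Int) (pos : List Int) : Decidable (Pre_find_i spread pos) := by unfold Pre_find_i; infer_instance

def pvWitness_find_i : List Int × List Int := ([0, 2, 4], [1, 3])

def Spec_find_i (spread : List Int) (pos : List Int) (out : Int) : Prop := out = find_i_alt spread pos
instance (spread : List Int) (pos : List Int) (out : Int) : Decidable (Spec_find_i spread pos out) := by unfold Spec_find_i; infer_instance

-- ===== CLAIM (what is proved, stated in full; the proofs are below) =====
def Claim_equal_find_i : Prop := ∀ (spread : List Int) (pos : List Int), Dom_find_i spread pos → Pre_find_i spread pos → Spec_find_i spread pos (find_i spread pos)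

-- ===== LEMMAS AND PROOFS =====

-- the inner k-loop is j-independent: it is B's first_cell on y, mapped, guarded by j's x-test
theorem goK_eq (spread : List Int) (x y : Int) (j : Nat) (ks : List Nat) :
    pvAGoK spread x y j ks =
      if spread.getD j 0 ≤ x ∧ x < spread.getD (j+1) 0 then
        (pvBFirstCell spread y ks).map (fun k => (j : Int) + (k : Int) * 10)
      else none := by
  induction ks with
  | nil => simp [pvAGoK, pvBFirstCell]
  | cons k ks ih =>
    simp only [pvAGoK, pvBFirstCell, List.getD_eq_getElem?_getD] at ih ⊢
    by_cases h1 : spread[j]?.getD 0 ≤ x ∧ x < spread[j+1]?.getD 0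
    · by_cases h2 : spread[k]?.getD 0 ≤ y ∧ y < spread[k+1]?.getD 0
      · simp [h1, h2]
      · simp [h1, h2, ih]
    · simp [h1, ih]

-- hence the whole nested loop equals B's two independent searches
theorem goJ_eq (spread : List Int) (x y : Int) (js : List Nat) :
    pvAGoJ spread x y js =
      match pvBFirstCell spread x js,
            pvBFirstCell spread y (List.range (spread.length - 1)) with
      | some j, some k => some ((j : Int) + (k : Int) * 10)
      | _, _ => none := by
  induction js with
  | nil =>
    cases pvBFirstCell spread y (List.range (spread.length - 1)) <;>
      simp [pvAGoJ, pvBFirstCell]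
  | cons j js ih =>
    simp only [pvAGoJ, pvBFirstCell, goK_eq, List.getD_eq_getElem?_getD] at ih ⊢
    by_cases h1 : spread[j]?.getD 0 ≤ x ∧ x < spread[j+1]?.getD 0
    · cases hy : pvBFirstCell spread y (List.range (spread.length - 1)) with
      | none =>
        simp only [h1, hy, ih]
        cases pvBFirstCell spread x js <;> rfl
      | some k => simp [h1]
    · simp [h1, ih]

-- ===== VERDICT (by name: the statement is the Claim_ definition above) =====
theorem find_i_spec : Claim_equal_find_i := by
  intro spread pos _ _
  unfold Spec_find_i find_i find_i_alt
  cases PySem.List.pyGet? pos 0 <;> cases PySem.List.pyGet? pos 1 <;> simp only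
  rw [goJ_eq]
  cases pvBFirstCell spread _ (List.range (spread.length - 1)) <;>
    cases pvBFirstCell spread _ (List.range (spread.length - 1)) <;> rfl
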